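-- pv_equiv track=rewrite | github.com/irskep/autowt | src/autowt/services/completion.py | _parse_worktree_branches
-- ===== SOURCE A (Python) =====
-- def _parse_worktree_branches(porcelain_output: str) -> list[str]:
--     """Extract branch names from 'git worktree list --porcelain' output.
--
--     Only returns branches (skips detached-HEAD worktrees).
--     This is an intentionally lightweight re-implementation that avoids importing
--     GitOutputParser (and its heavy transitive deps) on every tab press.
--     """
--     branches: list[str] = []
--     current_branch: str | None = None
--
--     for line in porcelain_output.strip().split("\n"):
--         if not line:
--             if current_branch is not None:
--                 branches.append(current_branch)
--             current_branch = None
--         elif line.startswith("branch refs/heads/"):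
--             current_branch = line[18:]  # strip 'branch refs/heads/'
--
--     # Flush last entry (no trailing blank line)
--     if current_branch is not None:
--         branches.append(current_branch)
--
--     return branches
-- ===== SOURCE B (Python) =====
-- def _parse_worktree_branches(porcelain_output: str) -> list[str]:
--     """Extract branch names from 'git worktree list --porcelain' output.
--
--     Record-oriented: each worktree entry is a blank-line-separated block, so
--     split the stripped output into blocks on "\n\n" and take the last
--     'branch refs/heads/' line of each block; blocks without one (detached
--     HEAD) are skipped.
--     """
--     prefix = "branch refs/heads/"
--     branches: list[str] = []
--     for block in porcelain_output.strip().split("\n\n"):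
--         hits = [line[len(prefix):] for line in block.split("\n") if line.startswith(prefix)]
--         if hits:
--             branches.append(hits[-1])
--     return branches
-- ===== Notes on version B (the rewrite author's own statement) =====
-- stated objective: simpler
-- what changed: Replaces the single-pass line scan carrying an Option current_branch with a trailing flush by a record-oriented decomposition: split the stripped output into per-worktree blocks on "\n\n" and keep the last 'branch refs/heads/' line of each block.
import Mathlib
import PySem

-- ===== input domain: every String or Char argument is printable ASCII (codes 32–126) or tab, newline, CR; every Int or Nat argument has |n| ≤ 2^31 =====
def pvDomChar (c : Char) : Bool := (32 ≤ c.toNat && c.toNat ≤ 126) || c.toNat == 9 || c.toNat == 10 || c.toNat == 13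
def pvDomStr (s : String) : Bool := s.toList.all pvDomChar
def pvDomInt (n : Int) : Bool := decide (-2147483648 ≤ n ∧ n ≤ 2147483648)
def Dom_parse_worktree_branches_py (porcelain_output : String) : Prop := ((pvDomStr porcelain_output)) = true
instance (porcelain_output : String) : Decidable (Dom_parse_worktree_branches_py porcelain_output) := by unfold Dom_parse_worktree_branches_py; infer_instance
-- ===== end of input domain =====

-- B replaces A's carried current_branch state and trailing flush by splitting the stripped
-- output into per-worktree blocks on "\n\n" and keeping each block's last branch line
-- (objective: simpler, record-oriented decomposition).

-- ===== PORT A =====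
-- s.split("\n"): PySem.Str.split? is none only for sep = "", so .getD [] is exact here (both ports).
-- line[18:]  (strip 'branch refs/heads/')
def pvStrip18 (line : String) : String := PySem.Str.slice line (some 18) none

def pvFlushA (st : List String × Option String) : List String :=
  match st.2 with
  | some b => st.1 ++ [b]
  | none => st.1

def pvStepA (st : List String × Option String) (line : String) : List String × Option String :=
  if line = "" then (pvFlushA st, none)
  else if PySem.Str.startswith line "branch refs/heads/" then (st.1, some (pvStrip18 line))
  else st

def parse_worktree_branches_py (porcelain_output : String) : List String :=
  pvFlushA (((PySem.Str.split? (PySem.Str.strip porcelain_output) "\n").getD []).foldl pvStepA ([], none))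

-- ===== PORT B =====
-- hits = [line[len(prefix):] for line in block.split("\n") if line.startswith(prefix)]
def pvBlockHits (block : String) : List String :=
  (((PySem.Str.split? block "\n").getD []).filter
      (fun line => PySem.Str.startswith line "branch refs/heads/")).map
    (fun line => PySem.Str.slice line (some 18) none)

def parse_worktree_branches_py_alt (porcelain_output : String) : List String :=
  ((PySem.Str.split? (PySem.Str.strip porcelain_output) "\n\n").getD []).foldl
    (fun branches block =>
      match (pvBlockHits block).getLast? with
      | some h => branches ++ [h]
      | none => branches) []

-- ===== PRECONDITION & SPEC =====
def Spec_parse_worktree_branches_py (porcelain_output : String) (out : List String) : Prop := out = parse_worktree_branches_py_alt porcelain_output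
instance (porcelain_output : String) (out : List String) : Decidable (Spec_parse_worktree_branches_py porcelain_output out) := by unfold Spec_parse_worktree_branches_py; infer_instance

-- ===== CLAIM (what is proved, stated in full; the proofs are below) =====
def Claim_equal_parse_worktree_branches_py : Prop := ∀ (porcelain_output : String), Dom_parse_worktree_branches_py porcelain_output → Spec_parse_worktree_branches_py porcelain_output (parse_worktree_branches_py porcelain_output)

-- ===== LEMMAS AND PROOFS =====

-- the branch-line prefix, as chars
def pvPfx : List Char := "branch refs/heads/".toList

-- char-level mirrors of the two ports
def pvCFlush (st : List (List Char) × Option (List Char)) : List (List Char) :=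
  match st.2 with
  | some b => st.1 ++ [b]
  | none => st.1

def pvCStep (st : List (List Char) × Option (List Char)) (l : List Char) :
    List (List Char) × Option (List Char) :=
  if l = [] then (pvCFlush st, none)
  else if PySem.Chars.startswith l pvPfx then (st.1, some (l.drop 18))
  else st

def pvHits (ls : List (List Char)) : List (List Char) :=
  (ls.filter (fun l => PySem.Chars.startswith l pvPfx)).map (fun l => l.drop 18)

def pvOptL : Option (List Char) → List (List Char)
  | some b => [b]
  | none => []

-- split a line list into segments at blank lines
def pvSeg : List (List Char) → List (List (List Char))
  | [] => [[]]
  | l :: ls => if l = [] then [] :: pvSeg ls else (l :: (pvSeg ls).headD []) :: (pvSeg ls).tail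

-- split a char list at each '\n'  (reference form of Chars.splitOn · ['\n'])
def pvNL : List Char → List (List Char)
  | [] => [[]]
  | c :: r => if c = '\n' then [] :: pvNL r else (c :: (pvNL r).headD []) :: (pvNL r).tail

-- split a char list at each leftmost "\n\n"  (reference form of Chars.splitOn · ['\n','\n'])
def pvNL2 : List Char → List (List Char)
  | [] => [[]]
  | [c] => [[c]]
  | c :: d :: r =>
    if c = '\n' ∧ d = '\n' then [] :: pvNL2 r
    else (c :: (pvNL2 (d :: r)).headD []) :: (pvNL2 (d :: r)).tail

-- rejoin blocks' line lists with one blank line between blocks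
def pvJoin : List (List (List Char)) → List (List Char)
  | [] => [[]]
  | [L] => L
  | L :: Ls => L ++ [] :: pvJoin Ls

-- does a char list contain "\n\n"?
def pvDD : List Char → Bool
  | c :: d :: r => (c == '\n' && d == '\n') || pvDD (d :: r)
  | _ => false

lemma pvNL_ne_nil (cs : List Char) : pvNL cs ≠ [] := by
  cases cs with
  | nil => simp [pvNL]
  | cons c r => simp only [pvNL]; split <;> simp

lemma pvNL2_ne_nil (cs : List Char) : pvNL2 cs ≠ [] := by
  match cs with
  | [] => simp [pvNL2]
  | [c] => simp [pvNL2]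
  | c :: d :: r => simp only [pvNL2]; split <;> simp

lemma pvSeg_ne_nil (ls : List (List Char)) : pvSeg ls ≠ [] := by
  cases ls with
  | nil => simp [pvSeg]
  | cons l ls => simp only [pvSeg]; split <;> simp

-- splitOn.go with l = [] returns the flushed accumulator whatever the fuel
lemma pvGo_nil (sep : List Char) (fuel : Nat) (cur : List Char) (acc : List (List Char)) :
    PySem.Chars.splitOn.go sep fuel [] cur acc = acc.reverse ++ [cur.reverse] := by
  cases fuel <;> rw [PySem.Chars.splitOn.go.eq_def] <;> simp

lemma pvCons_of_ne_nil {α : Type} (L : List (List α)) (h : L ≠ []) :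
    ∃ x t, L = x :: t := by
  cases L with
  | nil => exact absurd rfl h
  | cons a b => exact ⟨a, b, rfl⟩

lemma pvGoNL (fuel : Nat) (l cur : List Char) (acc : List (List Char)) (h : l.length < fuel) :
    PySem.Chars.splitOn.go ['\n'] fuel l cur acc
      = acc.reverse ++ (cur.reverse ++ (pvNL l).headD []) :: (pvNL l).tail := by
  induction fuel generalizing l cur acc with
  | zero => omega
  | succ f ih =>
    cases l with
    | nil => rw [pvGo_nil]; simp [pvNL]
    | cons c rest =>
      rw [PySem.Chars.splitOn.go.eq_def]
      simp only []
      simp only [List.length_cons] at h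
      obtain ⟨x, t, hx⟩ := pvCons_of_ne_nil _ (pvNL_ne_nil rest)
      by_cases hc : c = '\n'
      · subst hc
        have hp : List.isPrefixOf ['\n'] ('\n' :: rest) = true := by simp [List.isPrefixOf]
        rw [if_pos hp]
        have hd : List.drop (['\n'] : List Char).length ('\n' :: rest) = rest := rfl
        rw [hd, ih rest [] (cur.reverse :: acc) (by omega)]
        simp [pvNL, hx]
      · have hp : List.isPrefixOf ['\n'] (c :: rest) = false := by
          simp [List.isPrefixOf]; exact fun hh => hc hh.symm
        rw [if_neg (by simp [hp])]
        rw [ih rest (c :: cur) acc (by omega)]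
        simp [pvNL, if_neg hc, hx]

lemma pvGoNL2 (fuel : Nat) (l cur : List Char) (acc : List (List Char)) (h : l.length < fuel) :
    PySem.Chars.splitOn.go ['\n', '\n'] fuel l cur acc
      = acc.reverse ++ (cur.reverse ++ (pvNL2 l).headD []) :: (pvNL2 l).tail := by
  induction fuel generalizing l cur acc with
  | zero => omega
  | succ f ih =>
    match l with
    | [] => rw [pvGo_nil]; simp [pvNL2]
    | [c] =>
      rw [PySem.Chars.splitOn.go.eq_def]
      simp only []
      have hp : List.isPrefixOf ['\n', '\n'] [c] = false := by simp [List.isPrefixOf]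
      rw [if_neg (by simp [hp])]
      rw [pvGo_nil]
      simp [pvNL2]
    | c :: d :: r =>
      rw [PySem.Chars.splitOn.go.eq_def]
      simp only []
      simp only [List.length_cons] at h
      by_cases hc : c = '\n' ∧ d = '\n'
      · obtain ⟨hc1, hc2⟩ := hc; subst hc1; subst hc2
        have hp : List.isPrefixOf ['\n', '\n'] ('\n' :: '\n' :: r) = true := by
          simp [List.isPrefixOf]
        rw [if_pos hp]
        have hd : List.drop (['\n', '\n'] : List Char).length ('\n' :: '\n' :: r) = r := rfl
        rw [hd, ih r [] (cur.reverse :: acc) (by omega)]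
        obtain ⟨x, t, hx⟩ := pvCons_of_ne_nil _ (pvNL2_ne_nil r)
        simp [pvNL2, hx]
      · have hp : List.isPrefixOf ['\n', '\n'] (c :: d :: r) = false := by
          simp [List.isPrefixOf]
          intro h1 h2; exact hc ⟨h1.symm, h2.symm⟩
        rw [if_neg (by simp [hp])]
        rw [ih (d :: r) (c :: cur) acc (by simp; omega)]
        obtain ⟨x, t, hx⟩ := pvCons_of_ne_nil _ (pvNL2_ne_nil (d :: r))
        simp only [pvNL2, if_neg hc, hx]
        simp

lemma pvSplitOn_nl (cs : List Char) : PySem.Chars.splitOn cs ['\n'] = pvNL cs := by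
  unfold PySem.Chars.splitOn
  rw [pvGoNL (cs.length + 1) cs [] [] (by omega)]
  obtain ⟨x, t, hx⟩ := pvCons_of_ne_nil _ (pvNL_ne_nil cs)
  simp [hx]

lemma pvSplitOn_nl2 (cs : List Char) : PySem.Chars.splitOn cs ['\n', '\n'] = pvNL2 cs := by
  unfold PySem.Chars.splitOn
  rw [pvGoNL2 (cs.length + 1) cs [] [] (by omega)]
  obtain ⟨x, t, hx⟩ := pvCons_of_ne_nil _ (pvNL2_ne_nil cs)
  simp [hx]

lemma pvJoin_cons (L : List (List Char)) (Ls : List (List (List Char))) (h : Ls ≠ []) :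
    pvJoin (L :: Ls) = L ++ [] :: pvJoin Ls := by
  cases Ls with
  | nil => exact absurd rfl h
  | cons a b => rfl

lemma pvJoin_cons_head (x : List Char) (b : List (List Char)) (M : List (List (List Char))) :
    pvJoin ((x :: b) :: M) = x :: pvJoin (b :: M) := by
  cases M with
  | nil => rfl
  | cons m ms => simp [pvJoin_cons _ _ (by simp : (m :: ms : List (List (List Char))) ≠ [])]

lemma pvMap_ne_nil (cs : List Char) : (pvNL2 cs).map pvNL ≠ [] := by
  simp [pvNL2_ne_nil cs]

-- splitting on '\n' refines splitting on "\n\n": the line list is the blocks' line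
-- lists joined with one blank line between consecutive blocks
lemma pvNL_eq_join (cs : List Char) : pvNL cs = pvJoin ((pvNL2 cs).map pvNL) := by
  induction cs using pvNL2.induct with
  | case1 => simp [pvNL, pvNL2, pvJoin]
  | case2 c => simp [pvNL2, pvJoin]
  | case3 c d r hc ih =>
    obtain ⟨hc1, hc2⟩ := hc; subst hc1; subst hc2
    have hb : pvNL2 ('\n' :: '\n' :: r) = [] :: pvNL2 r := by simp [pvNL2]
    rw [hb, List.map_cons]
    have h1 : pvNL ([] : List Char) = [[]] := rfl
    rw [h1, pvJoin_cons _ _ (pvMap_ne_nil r)]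
    have h2 : pvNL ('\n' :: '\n' :: r) = [] :: [] :: pvNL r := by simp [pvNL]
    rw [h2, ih]
    rfl
  | case4 c d r hc ih =>
    obtain ⟨h, t, hx⟩ := pvCons_of_ne_nil _ (pvNL2_ne_nil (d :: r))
    have hblocks : pvNL2 (c :: d :: r) = (c :: h) :: t := by
      simp [pvNL2, if_neg hc, hx]
    rw [hblocks, List.map_cons]
    rw [hx, List.map_cons] at ih
    by_cases hcn : c = '\n'
    · subst hcn
      have h1 : pvNL ('\n' :: h) = [] :: pvNL h := by simp [pvNL]
      have h2 : pvNL ('\n' :: d :: r) = [] :: pvNL (d :: r) := by simp [pvNL]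
      rw [h1, h2, pvJoin_cons_head, ← ih]
    · obtain ⟨y, b', hy⟩ := pvCons_of_ne_nil _ (pvNL_ne_nil h)
      have h1 : pvNL (c :: h) = (c :: y) :: b' := by simp [pvNL, if_neg hcn, hy]
      have h2 : pvNL (c :: d :: r) = (c :: (pvNL (d :: r)).headD []) :: (pvNL (d :: r)).tail := by
        simp [pvNL, if_neg hcn]
      rw [h1, pvJoin_cons_head]
      have h3 : pvJoin ((y :: b') :: t.map pvNL) = y :: pvJoin (b' :: t.map pvNL) :=
        pvJoin_cons_head _ _ _
      rw [hy, h3] at ih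
      rw [h2, ih]
      simp

-- pvSeg splits at a blank line
lemma pvSeg_append_blank (x y : List (List Char)) :
    pvSeg (x ++ [] :: y) = pvSeg x ++ pvSeg y := by
  induction x with
  | nil => simp [pvSeg]
  | cons l x' ih =>
    by_cases hl : l = []
    · subst hl; simp [pvSeg, ih]
    · obtain ⟨a, t, ha⟩ := pvCons_of_ne_nil _ (pvSeg_ne_nil x')
      simp [pvSeg, if_neg hl, ih, ha]

lemma pvSeg_join_flatMap (F : List (List Char) → List (List Char)) :
    ∀ (Ls : List (List (List Char))), Ls ≠ [] →
      (pvSeg (pvJoin Ls)).flatMap F = Ls.flatMap (fun L => (pvSeg L).flatMap F) := by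
  intro Ls
  induction Ls with
  | nil => intro h; exact absurd rfl h
  | cons L Ls' ih =>
    intro _
    cases Ls' with
    | nil => simp [pvJoin]
    | cons L2 Ls'' =>
      rw [pvJoin_cons _ _ (by simp), pvSeg_append_blank, List.flatMap_cons, ← ih (by simp)]
      simp

-- A's scan, characterised: flush-of-fold = one appended (last) hit per pvSeg segment
def pvRunC : Option (List Char) → List (List (List Char)) → List (List Char)
  | _, [] => []
  | cur, b :: bs => pvOptL (((pvHits b).getLast?).or cur) ++ pvRunC none bs

lemma pvRunC_cons (cur : Option (List Char)) (b : List (List Char)) (bs : List (List (List Char))) :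
    pvRunC cur (b :: bs) = pvOptL (((pvHits b).getLast?).or cur) ++ pvRunC none bs := rfl

lemma pvFlushC_eq (acc : List (List Char)) (cur : Option (List Char)) :
    pvCFlush (acc, cur) = acc ++ pvOptL cur := by
  cases cur <;> simp [pvCFlush, pvOptL]

lemma pvGetLast?_cons_or {α : Type} (x : α) (xs : List α) :
    (x :: xs).getLast? = xs.getLast?.or (some x) := by
  induction xs with
  | nil => simp
  | cons y ys ih =>
    rw [List.getLast?_cons_cons]
    cases h : (y :: ys).getLast? with
    | none => simp_all
    | some z => simp

lemma pvKeyC (lines : List (List Char)) (acc : List (List Char)) (cur : Option (List Char)) :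
    pvCFlush (lines.foldl pvCStep (acc, cur)) = acc ++ pvRunC cur (pvSeg lines) := by
  induction lines generalizing acc cur with
  | nil => simp [pvSeg, pvRunC, pvHits, pvFlushC_eq]
  | cons l ls ih =>
    by_cases hb : l = []
    · subst hb
      rw [List.foldl_cons]
      have hs : pvCStep (acc, cur) [] = (acc ++ pvOptL cur, none) := by
        unfold pvCStep
        rw [if_pos rfl, pvFlushC_eq]
      have hseg : pvSeg ([] :: ls) = [] :: pvSeg ls := by simp [pvSeg]
      rw [hs, ih, hseg, pvRunC_cons]
      simp [pvHits, pvOptL, List.append_assoc]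
    · obtain ⟨h, t, hrest⟩ := pvCons_of_ne_nil _ (pvSeg_ne_nil ls)
      simp only [pvSeg, if_neg hb, hrest, List.headD, List.tail, List.foldl_cons, pvCStep]
      by_cases hp : PySem.Chars.startswith l pvPfx = true
      · rw [if_pos hp, ih, hrest, pvRunC_cons, pvRunC_cons]
        have hh : pvHits (l :: h) = l.drop 18 :: pvHits h := by
          simp only [pvHits, List.filter_cons, hp, if_true, List.map_cons]
        rw [hh, pvGetLast?_cons_or]
        cases (pvHits h).getLast? <;> simp [Option.or]
      · rw [if_neg hp, ih, hrest, pvRunC_cons, pvRunC_cons]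
        have hh : pvHits (l :: h) = pvHits h := by
          simp only [pvHits, List.filter_cons, hp, Bool.false_eq_true, if_false]
        rw [hh]

lemma pvRunC_none (bs : List (List (List Char))) :
    pvRunC none bs = bs.flatMap (fun b => pvOptL (pvHits b).getLast?) := by
  induction bs with
  | nil => simp [pvRunC]
  | cons b bs' ih => rw [pvRunC_cons, ih]; simp

-- blank lines carry no hits
lemma pvStartswith_nil : PySem.Chars.startswith [] pvPfx = false := by decide

lemma pvHits_blank_cons (x : List (List Char)) : pvHits ([] :: x) = pvHits x := by
  simp [pvHits, pvStartswith_nil]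

lemma pvHits_append_blank (x : List (List Char)) : pvHits (x ++ [[]]) = pvHits x := by
  simp [pvHits, List.filter_append, pvStartswith_nil]

-- every block produced by pvNL2 is free of "\n\n", and the head block is a prefix of the input
lemma pvNL2_blocks (cs : List Char) :
    (∀ b ∈ pvNL2 cs, pvDD b = false) ∧ (pvNL2 cs).headD [] <+: cs := by
  induction cs using pvNL2.induct with
  | case1 => refine ⟨?_, ?_⟩ <;> simp [pvNL2, pvDD]
  | case2 c => refine ⟨?_, ?_⟩ <;> simp [pvNL2, pvDD]
  | case3 c d r hc ih =>
    obtain ⟨hc1, hc2⟩ := hc; subst hc1; subst hc2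
    have hb : pvNL2 ('\n' :: '\n' :: r) = [] :: pvNL2 r := by simp [pvNL2]
    rw [hb]
    refine ⟨?_, by simp⟩
    intro b hbmem
    rcases List.mem_cons.mp hbmem with hb1 | hb2
    · subst hb1; rfl
    · exact ih.1 b hb2
  | case4 c d r hc ih =>
    obtain ⟨h, t, hx⟩ := pvCons_of_ne_nil _ (pvNL2_ne_nil (d :: r))
    have hblocks : pvNL2 (c :: d :: r) = (c :: h) :: t := by simp [pvNL2, if_neg hc, hx]
    rw [hblocks]
    have hdd : pvDD (c :: h) = false := by
      cases h with
      | nil => rfl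
      | cons e h' =>
        have hpre : (e :: h') <+: (d :: r) := by
          have := ih.2; rw [hx] at this; simpa using this
        obtain ⟨hed, _⟩ := List.cons_prefix_cons.mp hpre
        have hfirst : (c == '\n' && e == '\n') = false := by
          by_cases h1 : c = '\n' <;> by_cases h2 : e = '\n' <;> simp [h1, h2]
          exact absurd ⟨h1, hed ▸ h2⟩ hc
        have hrest : pvDD (e :: h') = false :=
          ih.1 (e :: h') (by rw [hx]; exact List.mem_cons_self)
        show ((c == '\n' && e == '\n') || pvDD (e :: h')) = false
        rw [hfirst, hrest]
        rfl
    refine ⟨?_, ?_⟩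
    · intro b hbmem
      rcases List.mem_cons.mp hbmem with hb1 | hb2
      · subst hb1; exact hdd
      · exact ih.1 b (by rw [hx]; exact List.mem_cons_of_mem _ hb2)
    · have := ih.2; rw [hx] at this
      exact List.cons_prefix_cons.mpr ⟨rfl, by simpa using this⟩

-- a "\n\n"-free block's lines: a middle run of nonblank lines, with at most one
-- blank line at each end
lemma pvStruct (b : List Char) (hdd : pvDD b = false) :
    ∃ mid, (∀ l ∈ mid, l ≠ []) ∧
      (pvNL b = mid ∨ pvNL b = mid ++ [[]] ∨ pvNL b = [] :: mid ∨ pvNL b = [] :: (mid ++ [[]])) := by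
  induction b with
  | nil => exact ⟨[], by simp, Or.inr (Or.inr (Or.inl rfl))⟩
  | cons c rest ih =>
    by_cases hcn : c = '\n'
    · subst hcn
      cases rest with
      | nil => exact ⟨[], by simp, Or.inr (Or.inr (Or.inr (by simp [pvNL])))⟩
      | cons e r' =>
        have hdd' : ((('\n' : Char) == '\n' && e == '\n') || pvDD (e :: r')) = false := hdd
        simp only [beq_self_eq_true, Bool.true_and, Bool.or_eq_false_iff] at hdd'
        have hen : e ≠ '\n' := by
          intro he; rw [he] at hdd'; simp at hdd'
        have hrest : pvDD (e :: r') = false := hdd'.2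
        obtain ⟨mid, hmid, hforms⟩ := ih hrest
        obtain ⟨y, b', hy⟩ := pvCons_of_ne_nil _ (pvNL_ne_nil (e :: r'))
        have hhead : pvNL (e :: r') = (e :: (pvNL r').headD []) :: (pvNL r').tail := by
          simp [pvNL, if_neg hen]
        have hnl : pvNL ('\n' :: e :: r') = [] :: pvNL (e :: r') := by simp [pvNL]
        rcases hforms with hf | hf | hf | hf
        · exact ⟨mid, hmid, Or.inr (Or.inr (Or.inl (by rw [hnl, hf])))⟩
        · exact ⟨mid, hmid, Or.inr (Or.inr (Or.inr (by rw [hnl, hf])))⟩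
        · exfalso
          rw [hhead] at hf
          exact absurd (congrArg (fun L => L.headD ([' '] : List Char)) hf) (by simp)
        · exfalso
          rw [hhead] at hf
          cases mid with
          | nil => exact absurd (congrArg (fun L => L.headD ([' '] : List Char)) hf) (by simp)
          | cons m ms => exact absurd (congrArg (fun L => L.headD ([' '] : List Char)) hf) (by simp)
    · have hrest : pvDD rest = false := by
        cases rest with
        | nil => rfl
        | cons e r' =>
          have hdd' : ((c == '\n' && e == '\n') || pvDD (e :: r')) = false := hdd
          exact (Bool.or_eq_false_iff.mp hdd').2
      obtain ⟨mid, hmid, hforms⟩ := ih hrest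
      obtain ⟨h, t, hx⟩ := pvCons_of_ne_nil _ (pvNL_ne_nil rest)
      have hnl : pvNL (c :: rest) = (c :: h) :: t := by simp [pvNL, if_neg hcn, hx]
      rcases hforms with hf | hf | hf | hf
      · -- pvNL rest = mid: h :: t = mid, all nonblank
        rw [hx] at hf
        refine ⟨(c :: h) :: t, ?_, Or.inl hnl⟩
        intro l hl
        rcases List.mem_cons.mp hl with h1 | h2
        · subst h1; simp
        · exact hmid l (hf ▸ List.mem_cons_of_mem _ h2)
      · rw [hx] at hf
        cases mid with
        | nil =>
          simp at hf
          refine ⟨[[c]], by simp, Or.inl ?_⟩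
          rw [hnl, hf.1, hf.2]
        | cons m ms =>
          have hh : h = m ∧ t = ms ++ [[]] := by
            simpa using hf
          refine ⟨(c :: h) :: ms, ?_, Or.inr (Or.inl ?_)⟩
          · intro l hl
            rcases List.mem_cons.mp hl with h1 | h2
            · subst h1; simp
            · exact hmid l (List.mem_cons_of_mem _ h2)
          · rw [hnl, hh.2]; simp
      · -- pvNL rest = [] :: mid
        rw [hx] at hf
        have hh : h = [] ∧ t = mid := by simpa using hf
        refine ⟨(c :: h) :: mid, ?_, Or.inl ?_⟩
        · intro l hl
          rcases List.mem_cons.mp hl with h1 | h2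
          · subst h1; simp
          · exact hmid l h2
        · rw [hnl, hh.2]
      · -- pvNL rest = [] :: (mid ++ [[]])
        rw [hx] at hf
        have hh : h = [] ∧ t = mid ++ [[]] := by simpa using hf
        refine ⟨(c :: h) :: mid, ?_, Or.inr (Or.inl ?_)⟩
        · intro l hl
          rcases List.mem_cons.mp hl with h1 | h2
          · subst h1; simp
          · exact hmid l h2
        · rw [hnl, hh.2]; simp

lemma pvSeg_nonblank (mid : List (List Char)) (h : ∀ l ∈ mid, l ≠ []) :
    pvSeg mid = [mid] := by
  induction mid with
  | nil => rfl
  | cons l x ih =>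
    have hl : l ≠ [] := h l List.mem_cons_self
    rw [show pvSeg (l :: x) = (l :: (pvSeg x).headD []) :: (pvSeg x).tail from by
      simp [pvSeg, if_neg hl]]
    rw [ih (fun l' hl' => h l' (List.mem_cons_of_mem _ hl'))]
    rfl

-- a segment's contribution to the output
def pvF (seg : List (List Char)) : List (List Char) := pvOptL (pvHits seg).getLast?

-- within a "\n\n"-free block, A's per-segment flushes amount to the block's last hit
lemma pvBlockEq (b : List Char) (hdd : pvDD b = false) :
    (pvSeg (pvNL b)).flatMap pvF = pvOptL (pvHits (pvNL b)).getLast? := by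
  obtain ⟨mid, hmid, hforms⟩ := pvStruct b hdd
  have hsmid : pvSeg mid = [mid] := pvSeg_nonblank mid hmid
  have hseg2 : pvSeg (mid ++ [[]]) = [mid, []] := by
    rw [show (mid ++ [[]] : List (List Char)) = mid ++ [] :: [] from rfl,
      pvSeg_append_blank, hsmid]
    rfl
  have hH0 : pvOptL (pvHits []).getLast? = [] := rfl
  rcases hforms with hf | hf | hf | hf <;> rw [hf]
  · rw [hsmid]; simp [pvF]
  · rw [hseg2, pvHits_append_blank]; simp [pvF, hH0]
  · rw [show pvSeg ([] :: mid) = [] :: pvSeg mid from by simp [pvSeg], hsmid,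
      pvHits_blank_cons]
    simp [pvF, hH0]
  · rw [show pvSeg ([] :: (mid ++ [[]])) = [] :: pvSeg (mid ++ [[]]) from by simp [pvSeg],
      hseg2, pvHits_blank_cons, pvHits_append_blank]
    simp [pvF, hH0]

-- the char-level heart: A's scan over lines = B's last-hit-per-"\n\n"-block
lemma pvMainC (cs : List Char) :
    pvCFlush ((pvNL cs).foldl pvCStep ([], none))
      = (pvNL2 cs).flatMap (fun b => pvOptL (pvHits (pvNL b)).getLast?) := by
  rw [pvKeyC, pvRunC_none, List.nil_append, pvNL_eq_join,
    pvSeg_join_flatMap _ _ (pvMap_ne_nil cs), List.flatMap_map]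
  exact List.flatMap_congr (fun b hb => pvBlockEq b ((pvNL2_blocks cs).1 b hb))

-- ---- lifting the String-level ports to the char level ----

def pvLiftSt (st : List (List Char) × Option (List Char)) : List String × Option String :=
  (st.1.map String.ofList, st.2.map String.ofList)

lemma pvSplitLines (t : String) :
    (PySem.Str.split? t "\n").getD [] = (pvNL t.toList).map String.ofList := by
  unfold PySem.Str.split?
  rw [show ("\n" : String).toList = ['\n'] from rfl]
  unfold PySem.Chars.split?
  rw [if_neg (by simp)]
  simp [pvSplitOn_nl]

lemma pvSplitBlocksStr (t : String) :
    (PySem.Str.split? t "\n\n").getD [] = (pvNL2 t.toList).map String.ofList := by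
  unfold PySem.Str.split?
  rw [show ("\n\n" : String).toList = ['\n', '\n'] from rfl]
  unfold PySem.Chars.split?
  rw [if_neg (by simp)]
  simp [pvSplitOn_nl2]

lemma pvStrip18_ofList (l : List Char) :
    PySem.Str.slice (String.ofList l) (some 18) none = String.ofList (l.drop 18) := by
  apply String.toList_inj.mp
  rw [PySem.Str.toList_slice, String.toList_ofList, PySem.Chars.slice_eq_listSlice,
    String.toList_ofList]
  exact PySem.List.slice_from l (by norm_num : (0:Int) ≤ 18)

lemma pvStartswith_ofList (l : List Char) :
    PySem.Str.startswith (String.ofList l) "branch refs/heads/"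
      = PySem.Chars.startswith l pvPfx := by
  rw [PySem.Str.startswith_eq, String.toList_ofList]
  rfl

lemma pvFlush_lift (st : List (List Char) × Option (List Char)) :
    pvFlushA (pvLiftSt st) = (pvCFlush st).map String.ofList := by
  obtain ⟨a, c⟩ := st
  cases c <;> simp [pvFlushA, pvCFlush, pvLiftSt]

lemma pvStep_lift (st : List (List Char) × Option (List Char)) (l : List Char) :
    pvStepA (pvLiftSt st) (String.ofList l) = pvLiftSt (pvCStep st l) := by
  obtain ⟨a, c⟩ := st
  unfold pvStepA pvCStep
  by_cases hl : l = []
  · subst hl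
    rw [if_pos (by simp), if_pos rfl, pvFlush_lift]
    rfl
  · rw [if_neg (by simpa using hl), if_neg hl, pvStartswith_ofList]
    by_cases hp : PySem.Chars.startswith l pvPfx = true
    · rw [if_pos hp, if_pos hp]
      unfold pvStrip18
      rw [pvStrip18_ofList]
      rfl
    · rw [if_neg hp, if_neg hp]

lemma pvPortA_lift (s : String) :
    parse_worktree_branches_py s
      = (pvCFlush ((pvNL (PySem.Str.strip s).toList).foldl pvCStep ([], none))).map
          String.ofList := by
  unfold parse_worktree_branches_py
  rw [pvSplitLines, List.foldl_map,
    show (([], none) : List String × Option String) = pvLiftSt ([], none) from rfl,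
    List.foldl_hom pvLiftSt (fun st l => pvStep_lift st l), pvFlush_lift]

def pvStepB (br : List (List Char)) (b : List Char) : List (List Char) :=
  match (pvHits (pvNL b)).getLast? with
  | some h => br ++ [h]
  | none => br

lemma pvBlockHits_ofList (b : List Char) :
    pvBlockHits (String.ofList b) = (pvHits (pvNL b)).map String.ofList := by
  unfold pvBlockHits pvHits
  rw [pvSplitLines, String.toList_ofList, List.filter_map]
  rw [List.filter_congr (fun l _ => by
    show PySem.Str.startswith (String.ofList l) "branch refs/heads/"
        = PySem.Chars.startswith l pvPfx
    exact pvStartswith_ofList l)]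
  rw [List.map_map, List.map_map]
  apply List.map_congr_left
  intro l _
  show PySem.Str.slice (String.ofList l) (some 18) none = String.ofList (l.drop 18)
  exact pvStrip18_ofList l

lemma pvStepB_lift (br : List (List Char)) (b : List Char) :
    (fun branches block =>
        match (pvBlockHits block).getLast? with
        | some h => branches ++ [h]
        | none => branches) (br.map String.ofList) (String.ofList b)
      = (pvStepB br b).map String.ofList := by
  simp only [pvBlockHits_ofList, List.getLast?_map, pvStepB]
  cases (pvHits (pvNL b)).getLast? <;> simp

lemma pvPortB_lift (s : String) :
    parse_worktree_branches_py_alt s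
      = ((pvNL2 (PySem.Str.strip s).toList).foldl pvStepB []).map String.ofList := by
  unfold parse_worktree_branches_py_alt
  rw [pvSplitBlocksStr, List.foldl_map,
    show ([] : List String) = ([] : List (List Char)).map String.ofList from rfl,
    List.foldl_hom (List.map String.ofList) (fun br b => pvStepB_lift br b)]

lemma pvFoldB_flatMap (bs : List (List Char)) (acc : List (List Char)) :
    bs.foldl pvStepB acc = acc ++ bs.flatMap (fun b => pvOptL (pvHits (pvNL b)).getLast?) := by
  induction bs generalizing acc with
  | nil => simp
  | cons b bs' ih =>
    rw [List.foldl_cons, ih, List.flatMap_cons]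
    unfold pvStepB
    cases (pvHits (pvNL b)).getLast? <;> simp [pvOptL]

-- ===== VERDICT (by name: the statement is the Claim_ definition above) =====
theorem parse_worktree_branches_py_spec : Claim_equal_parse_worktree_branches_py := by
  intro s _
  show parse_worktree_branches_py s = parse_worktree_branches_py_alt s
  rw [pvPortA_lift, pvPortB_lift, pvMainC, pvFoldB_flatMap, List.nil_append]
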